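-- pv_equiv track=rewrite | github.com/MooijGedaan/AdventOfCode | aoc/year2025/day06.py | get_numbers_from_parsed
-- ===== SOURCE A (Python) =====
-- def get_numbers_from_parsed(parsed: list[str], id: int) -> list[int]:
--     numbers = []
--     seperator_count = 0
--     for item in parsed:
--         if item == "|":
--             seperator_count += 1
--             continue
--         if seperator_count == id:
--             numbers.append(item)
--         elif seperator_count > id:
--             break
--     return numbers
-- ===== SOURCE B (Python) =====
-- def get_numbers_from_parsed(parsed: list[str], id: int) -> list[int]:
--     sections = []
--     current = []
--     for item in parsed:
--         if item == "|":
--             sections.append(current)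
--             current = []
--         else:
--             current.append(item)
--     sections.append(current)
--     if 0 <= id < len(sections):
--         return sections[id]
--     return []
-- ===== Notes on version B (the rewrite author's own statement) =====
-- stated objective: simpler
-- what changed: B builds the full list of pipe-delimited sections in one pass and returns a bounds-checked index lookup, replacing A's separator-counting scan with early break.
import Mathlib
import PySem

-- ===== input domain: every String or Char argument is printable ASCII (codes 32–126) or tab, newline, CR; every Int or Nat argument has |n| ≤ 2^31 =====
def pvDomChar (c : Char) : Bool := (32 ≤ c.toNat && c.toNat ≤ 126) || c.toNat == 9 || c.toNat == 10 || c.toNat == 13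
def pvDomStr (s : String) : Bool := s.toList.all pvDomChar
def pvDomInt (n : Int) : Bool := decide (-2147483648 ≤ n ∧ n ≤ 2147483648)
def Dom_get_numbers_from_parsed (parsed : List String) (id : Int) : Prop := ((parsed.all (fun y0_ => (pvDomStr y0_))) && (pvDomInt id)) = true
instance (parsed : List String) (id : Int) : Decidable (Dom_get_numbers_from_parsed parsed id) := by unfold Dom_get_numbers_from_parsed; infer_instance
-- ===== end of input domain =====

-- B replaces A's separator-counting scan (with early break) by building the full list of pipe-delimited sections in one pass and doing a bounds-checked index lookup; objective: simpler/alternative, same cost (not faster).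


-- ===== PORT A =====
-- loop of A as structural recursion over the items, carrying seperator_count; 'break' returns []
def goA : List String → Int → Int → List String
  | [], _, _ => []
  | item :: rest, sep, id =>
    if item = "|" then goA rest (sep + 1) id
    else if sep = id then item :: goA rest sep id
    else if sep > id then []
    else goA rest sep id

def get_numbers_from_parsed (parsed : List String) (id : Int) : List String :=
  goA parsed 0 id

-- ===== PORT B =====
-- loop of B as structural recursion carrying (sections, current); then bounds-checked lookup
def goB : List String → List (List String) → List String → List (List String)
  | [], secs, cur => secs ++ [cur]
  | item :: rest, secs, cur =>
    if item = "|" then goB rest (secs ++ [cur]) [] else goB rest secs (cur ++ [item])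

def get_numbers_from_parsed_alt (parsed : List String) (id : Int) : List String :=
  let sections := goB parsed [] []
  if 0 ≤ id ∧ id < (sections.length : Int) then sections.getD id.toNat [] else []

-- ===== PRECONDITION & SPEC =====
def Spec_get_numbers_from_parsed (parsed : List String) (id : Int) (out : List String) : Prop := out = get_numbers_from_parsed_alt parsed id
instance (parsed : List String) (id : Int) (out : List String) : Decidable (Spec_get_numbers_from_parsed parsed id out) := by unfold Spec_get_numbers_from_parsed; infer_instance

-- ===== CLAIM (what is proved, stated in full; the proofs are below) =====
def Claim_equal_get_numbers_from_parsed : Prop := ∀ (parsed : List String) (id : Int), Dom_get_numbers_from_parsed parsed id → Spec_get_numbers_from_parsed parsed id (get_numbers_from_parsed parsed id)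

-- ===== LEMMAS AND PROOFS =====

-- ===== VERDICT (by name: the statement is the Claim_ definition above) =====

theorem goB_prefix (l : List String) : ∀ (secs : List (List String)) (cur : List String), goB l secs cur = secs ++ goB l [] cur := by
  induction l with
  | nil => intro secs cur; simp [goB]
  | cons item rest ih =>
    intro secs cur
    by_cases h : item = "|"
    · simp only [goB, if_pos h]
      rw [ih (secs ++ [cur]) [], ih ([] ++ [cur]) []]
      simp
    · simp only [goB, if_neg h]
      exact ih secs (cur ++ [item])

theorem goB_shift (l : List String) : ∀ (cur : List String),
    goB l [] cur = (cur ++ (goB l [] []).headI) :: (goB l [] []).tail := by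
  induction l with
  | nil => intro cur; simp [goB]
  | cons item rest ih =>
    intro cur
    by_cases h : item = "|"
    · simp only [goB, if_pos h, List.nil_append]
      rw [goB_prefix rest [cur] [], goB_prefix rest [[]] []]
      simp
    · simp only [goB, if_neg h, List.nil_append]
      rw [ih (cur ++ [item]), ih [item]]
      simp

theorem goA_goB (l : List String) : ∀ (sep id : Int),
    goA l sep id = if id < sep then [] else (goB l [] []).getD (id - sep).toNat [] := by
  induction l with
  | nil =>
    intro sep id
    simp [goA, goB]
  | cons item rest ih =>
    intro sep id
    by_cases h : item = "|"
    · have hcons : goB (item :: rest) [] [] = [] :: goB rest [] [] := by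
        simp only [goB, if_pos h, List.nil_append]
        rw [goB_prefix rest [[]] []]; rfl
      have hA : goA (item :: rest) sep id = goA rest (sep + 1) id := by
        simp only [goA, if_pos h]
      rw [hcons, hA, ih (sep + 1) id]
      rcases lt_trichotomy id sep with hlt | heq | hgt
      · rw [if_pos (show id < sep + 1 by omega), if_pos hlt]
      · subst heq
        rw [if_pos (by omega), if_neg (by omega)]
        simp [List.getD]
      · rw [if_neg (by omega), if_neg (by omega)]
        have hts : (id - sep).toNat = (id - (sep + 1)).toNat + 1 := by omega
        rw [hts]
        simp [List.getD]
    · have hcons : goB (item :: rest) [] [] = ([item] ++ (goB rest [] []).headI) :: (goB rest [] []).tail := by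
        simp only [goB, if_neg h, List.nil_append]
        exact goB_shift rest [item]
      rw [hcons]
      simp only [goA, if_neg h]
      rcases lt_trichotomy id sep with hlt | heq | hgt
      · rw [if_neg (show ¬ sep = id by omega), if_pos (show sep > id by omega), if_pos hlt]
      · subst heq
        rw [if_pos rfl, ih id id, if_neg (by omega), if_neg (by omega)]
        simp only [sub_self, Int.toNat_zero, List.getD]
        cases hR : goB rest [] [] with
        | nil => rfl
        | cons hd tl => simp
      · rw [if_neg (show ¬ sep = id by omega), if_neg (show ¬ sep > id by omega),
          ih sep id, if_neg (by omega), if_neg (by omega)]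
        have hn : (id - sep).toNat = ((id - sep).toNat - 1) + 1 := by omega
        rw [hn]
        cases hR : goB rest [] [] with
        | nil => cases h' : (id - sep).toNat - 1 <;> simp [List.getD]
        | cons hd tl => simp [List.getD]

theorem getD_eq_nil_of_le {l : List (List String)} {n : Nat} (h : l.length ≤ n) :
    l.getD n [] = [] := by
  simp [List.getD, List.getElem?_eq_none (by omega)]

theorem get_numbers_from_parsed_spec : Claim_equal_get_numbers_from_parsed := by
  intro parsed id _
  show get_numbers_from_parsed parsed id = get_numbers_from_parsed_alt parsed id
  unfold get_numbers_from_parsed get_numbers_from_parsed_alt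
  rw [goA_goB parsed 0 id]
  simp only [Int.sub_zero]
  by_cases h0 : id < 0
  · rw [if_pos h0, if_neg (by omega)]
  · rw [if_neg h0]
    by_cases h1 : id < ((goB parsed [] []).length : Int)
    · rw [if_pos ⟨by omega, h1⟩]
    · rw [if_neg (by intro ⟨_, hc⟩; exact h1 hc),
        getD_eq_nil_of_le (by omega)]
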